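-- pv_equiv track=rewrite | github.com/mrkruk5/Sea_Ice_Classification | analysis_tools.py | crops_to_scene
-- ===== SOURCE A (Python) =====
-- def crops_to_scene(titles, img_name_set):
--     idx = []
--     for i in range(len(img_name_set)):
--         idx.append([])
--     for i, t in enumerate(titles):
--         for j, search_str in enumerate(img_name_set):
--             if search_str in t:
--                 idx[j].append(i)
--     return idx
-- ===== SOURCE B (Python) =====
-- def crops_to_scene(titles, img_name_set):
--     # Index the patterns by their text (duplicates share a row list), then make
--     # ONE pass over each title: enumerate its substrings (no longer than the
--     # longest pattern) once and look each up in the hash index, instead of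
--     # running a substring search for every (title, pattern) pair.
--     rows = {}
--     for j, p in enumerate(img_name_set):
--         rows.setdefault(p, []).append(j)
--     maxlen = max((len(p) for p in img_name_set), default=0)
--     idx = [[] for _ in img_name_set]
--     for i, t in enumerate(titles):
--         subs = {t[a:b] for a in range(len(t) + 1)
--                 for b in range(a, min(a + maxlen, len(t)) + 1)}
--         for s in subs:
--             for j in rows.get(s, ()):
--                 idx[j].append(i)
--     return idx
-- ===== Notes on version B (the rewrite author's own statement) =====
-- stated objective: alternative
-- what changed: Instead of running a substring search for every (title, pattern) pair, B builds a hash index pattern -> row indices once, then scans each title once, enumerating its substrings up to the longest pattern length and looking them up in the index; the inner per-pattern scan disappears.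
import Mathlib
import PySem

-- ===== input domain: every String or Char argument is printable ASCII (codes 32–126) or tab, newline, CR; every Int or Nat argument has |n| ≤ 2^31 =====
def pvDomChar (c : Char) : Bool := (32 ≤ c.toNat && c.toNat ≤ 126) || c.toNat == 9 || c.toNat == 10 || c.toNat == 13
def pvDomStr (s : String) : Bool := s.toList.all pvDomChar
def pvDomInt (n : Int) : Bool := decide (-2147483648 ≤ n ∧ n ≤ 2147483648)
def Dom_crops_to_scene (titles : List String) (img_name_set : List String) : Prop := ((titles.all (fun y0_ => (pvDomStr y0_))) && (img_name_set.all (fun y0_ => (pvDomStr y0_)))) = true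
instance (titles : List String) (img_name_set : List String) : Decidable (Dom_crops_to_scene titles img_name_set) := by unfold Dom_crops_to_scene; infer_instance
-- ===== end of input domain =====

-- B replaces A's per-(title, pattern) substring searches with a hash index: the patterns are
-- put in a dict pattern -> row indices once, and each title is scanned once, looking its own
-- substrings (no longer than the longest pattern) up in that index.

-- ===== PORT A =====
-- idx[j].append(i): j comes from enumerate(img_name_set), so j ≥ 0 and .toNat is exact.
def crops_to_scene (titles : List String) (img_name_set : List String) : List (List Int) :=
  (PySem.List.enumerate titles 0).foldl (fun idx it =>
    (PySem.List.enumerate img_name_set 0).foldl (fun idx js =>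
      if PySem.Str.isIn js.2 it.2 then idx.modify js.1.toNat (· ++ [it.1]) else idx) idx)
    ((PySem.List.pyRange 0 img_name_set.length 1).foldl (fun acc _ => acc ++ [[]]) [])

-- ===== PORT B =====
-- rows = {}; for j, p in enumerate(img_name_set): rows.setdefault(p, []).append(j)
def pvRows (img : List String) : PySem.Dict String (List Int) :=
  (PySem.List.enumerate img 0).foldl
    (fun d jp => d.modify jp.2 ([] : List Int) (· ++ [jp.1])) PySem.Dict.empty

-- maxlen = max((len(p) for p in img_name_set), default=0)
def pvMaxlen (img : List String) : Int :=
  PySem.List.maxD (img.map (fun p => PySem.Str.len p)) (fun x => x) 0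

-- the list underlying the set comprehension {t[a:b] for a … for b …} (Source B builds the set from it)
def pvSubsList (maxlen : Int) (t : String) : List String :=
  (PySem.List.pyRange 0 (PySem.Str.len t + 1) 1).foldl (fun acc a =>
    acc ++ (PySem.List.pyRange a (min (a + maxlen) (PySem.Str.len t) + 1) 1).map
      (fun b => PySem.Str.slice t (some a) (some b))) []

-- idx[j].append(i): j was stored from enumerate(img_name_set), so j ≥ 0 and .toNat is exact.
def crops_to_scene_alt (titles : List String) (img_name_set : List String) : List (List Int) :=
  (PySem.List.enumerate titles 0).foldl (fun idx it =>
    (PySem.Set.ofList (pvSubsList (pvMaxlen img_name_set) it.2)).foldl (fun idx s =>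
      ((pvRows img_name_set).getD s []).foldl (fun idx j => idx.modify j.toNat (· ++ [it.1])) idx) idx)
    (img_name_set.map (fun _ => ([] : List Int)))

-- ===== PRECONDITION & SPEC =====
def Spec_crops_to_scene (titles : List String) (img_name_set : List String) (out : List (List Int)) : Prop := out = crops_to_scene_alt titles img_name_set
instance (titles : List String) (img_name_set : List String) (out : List (List Int)) : Decidable (Spec_crops_to_scene titles img_name_set out) := by unfold Spec_crops_to_scene; infer_instance

-- ===== CLAIM (what is proved, stated in full; the proofs are below) =====
def Claim_equal_crops_to_scene : Prop := ∀ (titles : List String) (img_name_set : List String), Dom_crops_to_scene titles img_name_set → Spec_crops_to_scene titles img_name_set (crops_to_scene titles img_name_set)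

-- ===== LEMMAS AND PROOFS =====

-- the column both programs collect for a pattern p from a block of enumerated titles
def pvCol (p : String) (ts : List (Int × String)) : List Int :=
  (ts.filter (fun it => PySem.Str.isIn p it.2)).map (·.1)

-- the row list stored in B's dict under key s
def pvRowsList (img : List String) (s : String) : List Int :=
  ((PySem.List.enumerate img 0).filter (fun jp => jp.2 == s)).map (·.1)

-- ========== A-side lemmas (A = the pointwise column map) ==========

-- A's initial table is a list of img.length empty rows
theorem pv_init (l : List Int) (acc : List (List Int)) :
    l.foldl (fun acc _ => acc ++ [([] : List Int)]) acc
      = acc ++ List.replicate l.length [] := by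
  induction l generalizing acc with
  | nil => simp
  | cons x xs ih =>
    rw [List.foldl_cons, ih, List.append_assoc]
    simp [List.replicate_succ]

-- writing through index s of pre ++ l :: ls, with s = pre.length (models idx[j].append)
theorem pv_modify_mid {a : Type} (pre : List a) (l : a) (ls : List a) (f : a → a) :
    (pre ++ l :: ls).modify pre.length f = pre ++ f l :: ls := by
  induction pre with
  | nil => simp
  | cons x xs ih => simp [ih]

-- A's inner loop over the patterns, for one title (i, t), updates each row pointwise
theorem pv_inner (t : String) (i : Int) :
    ∀ (img : List String) (s : Nat) (pre idx : List (List Int)),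
      pre.length = s → idx.length = img.length →
      (PySem.List.enumerate img (s : Int)).foldl (fun acc js =>
          if PySem.Str.isIn js.2 t then acc.modify js.1.toNat (· ++ [i]) else acc) (pre ++ idx)
        = pre ++ (idx.zip img).map (fun li =>
            if PySem.Str.isIn li.2 t then li.1 ++ [i] else li.1) := by
  intro img
  induction img with
  | nil =>
    intro s pre idx hp hi
    simp at hi
    simp [PySem.List.enumerate_nil, hi]
  | cons p ps ih =>
    intro s pre idx hp hi
    cases idx with
    | nil => simp at hi
    | cons l ls =>
      have hmod : ∀ (f : List Int → List Int),
          (pre ++ l :: ls).modify s f = pre ++ f l :: ls := by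
        intro f; rw [← hp]; exact pv_modify_mid pre l ls f
      simp only [PySem.List.enumerate_cons, List.foldl_cons, List.zip_cons_cons, List.map_cons]
      have hcast : ((s : Int) + 1) = ((s + 1 : Nat) : Int) := by push_cast; ring
      rw [hcast]
      have hs : ((s : Int)).toNat = s := Int.toNat_natCast s
      by_cases h : PySem.Str.isIn p t = true
      · rw [if_pos h, if_pos h, hs, hmod]
        have := ih (s + 1) (pre ++ [l ++ [i]]) ls (by simp [hp]) (by simpa using hi)
        simp only [List.append_assoc, List.singleton_append] at this
        exact this
      · rw [if_neg h, if_neg h]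
        have := ih (s + 1) (pre ++ [l]) ls (by simp [hp]) (by simpa using hi)
        simp only [List.append_assoc, List.singleton_append] at this
        exact this

-- A's outer loop: after consuming a block of enumerated titles, each row has grown by its pvCol
theorem pv_outer (img : List String) :
    ∀ (ts : List (Int × String)) (idx : List (List Int)), idx.length = img.length →
      ts.foldl (fun idx it =>
          (PySem.List.enumerate img 0).foldl (fun acc js =>
            if PySem.Str.isIn js.2 it.2 then acc.modify js.1.toNat (· ++ [it.1]) else acc) idx) idx
        = (idx.zip img).map (fun li => li.1 ++ pvCol li.2 ts) := by
  intro ts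
  induction ts with
  | nil =>
    intro idx hi
    simp only [List.foldl_nil, pvCol, List.filter_nil, List.map_nil]
    exact (List.ext_getElem (by simp [hi]) (by intro n h1 h2; simp)).symm
  | cons it ts ih =>
    intro idx hi
    simp only [List.foldl_cons]
    have hinner := pv_inner it.2 it.1 img 0 [] idx rfl hi
    simp only [List.nil_append, Nat.cast_zero] at hinner
    rw [hinner]
    rw [ih _ (by simp [hi])]
    have hlen : (idx.zip img).length = idx.length := by simp [hi]
    apply List.ext_getElem
    · simp [hi]
    · intro n h1 h2
      simp only [List.getElem_map, List.getElem_zip, pvCol, List.filter_cons]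
      by_cases h : PySem.Chars.isIn (img[n]'(by simpa [hi] using h2)).toList it.2.toList = true
      · simp [h, List.append_assoc]
      · simp [h]

-- A's rows start empty and collect exactly the column map
theorem pv_zip_replicate (img : List String) (ts : List (Int × String)) :
    ((List.replicate img.length ([] : List Int)).zip img).map (fun li => li.1 ++ pvCol li.2 ts)
      = img.map (fun p => pvCol p ts) := by
  apply List.ext_getElem (by simp)
  intro n h1 h2
  simp [pvCol]

-- ========== B-side lemmas ==========

-- the dict built by B's setdefault/append loop, read back
theorem pv_rows_getD (img : List String) (s : String) :
    (pvRows img).getD s [] = pvRowsList img s := by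
  unfold pvRows pvRowsList
  have h2 : (PySem.List.enumerate img 0).foldl
        (fun d jp => d.modify jp.2 ([] : List Int) (· ++ [jp.1])) PySem.Dict.empty
      = ((PySem.List.enumerate img 0).map (fun jp => (jp.2, jp.1))).foldl
        (fun d p => d.modify p.1 ([] : List Int) (· ++ [p.2])) PySem.Dict.empty := by
    rw [List.foldl_map]
  rw [h2]
  rw [PySem.Dict.getD_foldl_modify_append]
  simp [List.filter_map, List.map_map, Function.comp_def]

-- every entry of a row list is a nonnegative index
theorem pv_rowsList_nonneg (img : List String) (s : String) :
    ∀ j ∈ pvRowsList img s, 0 ≤ j := by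
  intro j hj
  simp only [pvRowsList, List.mem_map, List.mem_filter] at hj
  obtain ⟨jp, ⟨hjm, _⟩, rfl⟩ := hj
  rw [PySem.List.mem_enumerate_iff] at hjm
  obtain ⟨k, hk, rfl⟩ := hjm
  simp

-- membership of index k in the row of s: exactly when img[k] = s
theorem pv_mem_rowsList (img : List String) (s : String) (k : Nat) (hk : k < img.length) :
    ((k : Int) ∈ pvRowsList img s) ↔ img[k] = s := by
  simp only [pvRowsList, List.mem_map, List.mem_filter, PySem.List.mem_enumerate_iff]
  constructor
  · rintro ⟨jp, ⟨⟨m, hm, rfl⟩, hs⟩, h1⟩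
    simp only [zero_add, beq_iff_eq] at hs h1
    have : m = k := by exact_mod_cast h1
    subst this; exact hs
  · intro hs
    exact ⟨((k : Int), img[k]), ⟨⟨k, hk, by simp⟩, by simp [hs]⟩, rfl⟩

-- row lists have strictly increasing entries, hence no duplicates
theorem pv_rowsList_nodup (img : List String) (s : String) : (pvRowsList img s).Nodup := by
  have hpw : (pvRowsList img s).Pairwise (· < ·) := by
    unfold pvRowsList
    exact (List.Pairwise.sublist List.filter_sublist
      (PySem.List.pairwise_lt_enumerate img 0)).map _ (fun _ _ h => h)
  exact hpw.imp (fun h => ne_of_lt h)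

-- count of k in the row of s
theorem pv_count_rowsList (img : List String) (s : String) (k : Nat) (hk : k < img.length) :
    (pvRowsList img s).count (k : Int) = if img[k] = s then 1 else 0 := by
  by_cases h : img[k] = s
  · rw [if_pos h]
    exact List.count_eq_one_of_mem (pv_rowsList_nodup img s)
      ((pv_mem_rowsList img s k hk).2 h)
  · rw [if_neg h, List.count_eq_zero]
    exact fun hm => h ((pv_mem_rowsList img s k hk).1 hm)

-- total count of k over the rows of a duplicate-free key list
theorem pv_count_flat (img : List String) (k : Nat) (hk : k < img.length) :
    ∀ (subs : List String), subs.Nodup →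
      (subs.flatMap (pvRowsList img)).count (k : Int)
        = if img[k] ∈ subs then 1 else 0 := by
  intro subs
  induction subs with
  | nil => simp
  | cons s rest ih =>
    intro hnd
    rw [List.nodup_cons] at hnd
    rw [List.flatMap_cons, List.count_append, pv_count_rowsList img s k hk, ih hnd.2]
    by_cases h : img[k] = s
    · simp [h, hnd.1]
    · simp [h, List.mem_cons]

-- the append-fold preserves the table's length
theorem pv_fold_len (i : Int) :
    ∀ (J : List Int) (idx : List (List Int)),
      (J.foldl (fun a j => a.modify j.toNat (· ++ [i])) idx).length = idx.length := by
  intro J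
  induction J with
  | nil => simp
  | cons j J ih => intro idx; rw [List.foldl_cons, ih]; simp

-- the append-fold applied pointwise: row k grows once per occurrence of k
theorem pv_fold_getD (i : Int) :
    ∀ (J : List Int) (idx : List (List Int)) (k : Nat), (∀ j ∈ J, 0 ≤ j) → k < idx.length →
      (J.foldl (fun a j => a.modify j.toNat (· ++ [i])) idx).getD k []
        = (fun l => l ++ [i])^[J.count (k : Int)] (idx.getD k []) := by
  intro J
  induction J with
  | nil => simp
  | cons j J ih =>
    intro idx k hJ hk
    rw [List.foldl_cons, ih _ k (fun x hx => hJ x (List.mem_cons_of_mem j hx))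
      (by simpa using hk)]
    have hg : (idx.modify j.toNat (· ++ [i])).getD k []
        = if j.toNat = k then idx.getD k [] ++ [i] else idx.getD k [] := by
      rw [List.getD_eq_getElem _ _ (by simpa using hk), List.getElem_modify,
        List.getD_eq_getElem _ _ hk]
    rw [hg, List.count_cons]
    have hj0 : 0 ≤ j := hJ j List.mem_cons_self
    by_cases hjk : j = (k : Int)
    · have ht : j.toNat = k := by omega
      subst hjk
      simp [Function.iterate_succ_apply]
    · have ht : j.toNat ≠ k := fun h => hjk (by omega)
      simp [ht, hjk]

-- B's per-title double loop (set of substrings, then dict rows) is the pointwise update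
theorem pv_title (img : List String) (subs : List String) (hnd : subs.Nodup) (i : Int)
    (idx : List (List Int)) (hlen : idx.length = img.length) :
    subs.foldl (fun idx s =>
        (pvRowsList img s).foldl (fun a j => a.modify j.toNat (· ++ [i])) idx) idx
      = (idx.zip img).map (fun li => if li.2 ∈ subs then li.1 ++ [i] else li.1) := by
  rw [← List.foldl_flatMap]
  have hJ : ∀ j ∈ subs.flatMap (pvRowsList img), 0 ≤ j := by
    intro j hj
    rw [List.mem_flatMap] at hj
    obtain ⟨s, _, hjs⟩ := hj
    exact pv_rowsList_nonneg img s j hjs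
  apply List.ext_getElem
  · rw [pv_fold_len]; simp [hlen]
  · intro k h1 h2
    have hk : k < idx.length := by rw [pv_fold_len] at h1; exact h1
    have hki : k < img.length := hlen ▸ hk
    rw [← List.getD_eq_getElem _ [] h1, pv_fold_getD i _ idx k hJ hk,
      pv_count_flat img k hki subs hnd, List.getElem_map, List.getElem_zip,
      List.getD_eq_getElem _ [] hk]
    by_cases h : img[k] ∈ subs
    · simp [h]
    · simp [h]

-- every pattern length is bounded by B's maxlen
theorem pv_maxlen_bound (img : List String) (p : String) (hp : p ∈ img) :
    (p.toList.length : Int) ≤ pvMaxlen img := by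
  unfold pvMaxlen PySem.List.maxD
  cases hmax : PySem.List.max? (img.map (fun q => PySem.Str.len q)) (fun x => x) with
  | none =>
    rw [PySem.List.max?_eq_none_iff] at hmax
    rw [List.map_eq_nil_iff] at hmax
    subst hmax; cases hp
  | some m =>
    have := PySem.List.max?_isMax hmax (PySem.Str.len p) (List.mem_map_of_mem hp)
    simpa [PySem.Str.len] using this

-- the substring enumeration hits exactly the infixes of the title (up to length maxlen)
theorem pv_subs_infix (maxlen : Int) (t p : String) (hp : (p.toList.length : Int) ≤ maxlen) :
    (p ∈ pvSubsList maxlen t) ↔ p.toList <:+: t.toList := by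
  unfold pvSubsList
  rw [PySem.List.foldl_append_eq_flatMap]
  simp only [List.nil_append, List.mem_flatMap, List.mem_map, PySem.List.mem_pyRange_one,
    PySem.Str.len]
  constructor
  · rintro ⟨a, ⟨ha0, _⟩, b, ⟨⟨hab, hbm⟩, rfl⟩⟩
    have hb0 : 0 ≤ b := le_trans ha0 hab
    have hl : (PySem.Str.slice t (some a) (some b)).toList
        = (t.toList.drop a.toNat).take (b.toNat - a.toNat) := by
      rw [PySem.Str.toList_slice, PySem.Chars.slice_eq_listSlice,
        PySem.List.slice_toNat _ ha0 hb0]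
    rw [hl]
    exact ⟨t.toList.take a.toNat, (t.toList.drop a.toNat).drop (b.toNat - a.toNat), by
      rw [List.append_assoc, List.take_append_drop, List.take_append_drop]⟩
  · rintro ⟨s, u, hsu⟩
    have hlen : t.toList.length = s.length + p.toList.length + u.length := by
      rw [← hsu]; simp only [List.length_append]
    refine ⟨(s.length : Int), ⟨by positivity, by omega⟩,
      ((s.length : Int) + (p.toList.length : Int)), ⟨by omega, by omega⟩, ?_⟩
    apply String.toList_inj.mp
    rw [PySem.Str.toList_slice, PySem.Chars.slice_eq_listSlice,
      PySem.List.slice_toNat _ (by positivity) (by positivity)]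
    have h1 : ((s.length : Int) + (p.toList.length : Int)).toNat - (s.length : Int).toNat
        = p.toList.length := by omega
    have h2 : ((s.length : Int)).toNat = s.length := Int.toNat_natCast _
    rw [h1, h2, ← hsu, List.append_assoc, List.drop_left, List.take_left]

-- membership in B's substring set is Python's 'p in t', for patterns within the length cap
theorem pv_mem_subs (maxlen : Int) (t p : String) (hp : (p.toList.length : Int) ≤ maxlen) :
    (p ∈ PySem.Set.ofList (pvSubsList maxlen t)) ↔ PySem.Str.isIn p t = true := by
  rw [PySem.Set.mem_ofList, PySem.Str.isIn_iff_infix, pv_subs_infix maxlen t p hp]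

-- B's outer loop: after consuming a block of enumerated titles, each row has grown by its pvCol
theorem pv_outer_b (img : List String) :
    ∀ (ts : List (Int × String)) (idx : List (List Int)), idx.length = img.length →
      ts.foldl (fun idx it =>
          (PySem.Set.ofList (pvSubsList (pvMaxlen img) it.2)).foldl (fun idx s =>
            ((pvRows img).getD s []).foldl (fun idx j =>
              idx.modify j.toNat (· ++ [it.1])) idx) idx) idx
        = (idx.zip img).map (fun li => li.1 ++ pvCol li.2 ts) := by
  intro ts
  induction ts with
  | nil =>
    intro idx hi
    simp only [List.foldl_nil, pvCol, List.filter_nil, List.map_nil]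
    exact (List.ext_getElem (by simp [hi]) (by intro n h1 h2; simp)).symm
  | cons it ts ih =>
    intro idx hi
    simp only [pv_rows_getD] at ih ⊢
    simp only [List.foldl_cons]
    rw [pv_title img _ (PySem.Set.nodup_ofList _) it.1 idx hi]
    have hmem : (idx.zip img).map
        (fun li => if li.2 ∈ PySem.Set.ofList (pvSubsList (pvMaxlen img) it.2)
          then li.1 ++ [it.1] else li.1)
        = (idx.zip img).map (fun li =>
          if PySem.Str.isIn li.2 it.2 then li.1 ++ [it.1] else li.1) := by
      apply List.map_congr_left
      intro li hli
      have hpi : li.2 ∈ img := (List.of_mem_zip hli).2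
      rw [if_congr (pv_mem_subs (pvMaxlen img) it.2 li.2 (pv_maxlen_bound img li.2 hpi))
        rfl rfl]
    rw [hmem, ih _ (by simp [hi])]
    apply List.ext_getElem
    · simp [hi]
    · intro n h1 h2
      simp only [List.getElem_map, List.getElem_zip, pvCol, List.filter_cons]
      by_cases h : PySem.Chars.isIn (img[n]'(by simpa [hi] using h2)).toList it.2.toList = true
      · simp [h, List.append_assoc]
      · simp [h]

-- ========== the two programs meet at the column map ==========

theorem crops_to_scene_eq (titles img : List String) :
    crops_to_scene titles img = crops_to_scene_alt titles img := by
  have h0 : (PySem.List.pyRange 0 (img.length : Int) 1).foldl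
      (fun acc _ => acc ++ [[]]) ([] : List (List Int)) = List.replicate img.length [] := by
    rw [pv_init]
    simp [PySem.List.length_pyRange_one]
  unfold crops_to_scene crops_to_scene_alt
  rw [h0, pv_outer img (PySem.List.enumerate titles 0) _ (by simp),
    pv_zip_replicate img (PySem.List.enumerate titles 0),
    pv_outer_b img (PySem.List.enumerate titles 0) _ (by simp)]
  apply List.ext_getElem
  · simp
  · intro n h1 h2
    simp

-- ===== VERDICT (by name: the statement is the Claim_ definition above) =====
theorem crops_to_scene_spec : Claim_equal_crops_to_scene := by
  intro titles img _
  unfold Spec_crops_to_scene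
  exact crops_to_scene_eq titles img
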